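-- pv_equiv track=rewrite | github.com/mauboro/my_katas | kooka_counter/python/main.py | kooka_counter
-- ===== SOURCE A (Python) =====
-- def kooka_counter(laughing):
--     diff = ""
--     count = 0
--     for c in laughing:
--         if c == "h" and diff == "h":
--             pass
--         if c == "h" and diff != "h":
--             count += 1
--             diff = "h"
--         if c == "H" and diff == "H":
--             pass
--         if c == "H" and diff != "H":
--             count += 1
--             diff = "H"
--     return count
-- ===== SOURCE B (Python) =====
-- def kooka_counter(laughing):
--     # Keep only laughing characters, then count maximal runs of equal chars:
--     # one run for a non-empty stream plus one for each adjacent unequal pair.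
--     runs = [c for c in laughing if c in "hH"]
--     if not runs:
--         return 0
--     return 1 + sum(1 for a, b in zip(runs, runs[1:]) if a != b)
-- ===== Notes on version B (the rewrite author's own statement) =====
-- stated objective: simpler
-- what changed: Replaces the four-branch diff/count state machine with a stateless filter of the h/H subsequence followed by counting adjacent unequal pairs (run boundaries).
import Mathlib
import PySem

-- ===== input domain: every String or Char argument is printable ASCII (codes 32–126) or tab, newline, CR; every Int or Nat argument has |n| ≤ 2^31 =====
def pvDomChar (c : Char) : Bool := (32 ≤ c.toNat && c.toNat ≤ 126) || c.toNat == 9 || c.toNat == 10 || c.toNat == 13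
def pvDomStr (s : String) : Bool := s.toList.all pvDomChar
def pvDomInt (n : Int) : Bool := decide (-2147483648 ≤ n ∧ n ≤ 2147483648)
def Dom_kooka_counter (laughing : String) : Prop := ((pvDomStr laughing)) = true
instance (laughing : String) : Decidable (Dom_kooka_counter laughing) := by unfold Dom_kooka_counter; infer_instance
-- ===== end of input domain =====

-- B replaces A's diff/count state machine with filter-the-h/H-subsequence then
-- count adjacent unequal pairs (run boundaries); simpler, same O(n) cost.


-- ===== PORT A =====
-- one iteration of A's loop body: the four sequential ifs on (diff, count)
def kookaStepA (st : String × Int) (c : Char) : String × Int :=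
  -- if c == "h" and diff == "h": pass
  let st := if c = 'h' ∧ st.1 ≠ "h" then ("h", st.2 + 1) else st
  -- if c == "H" and diff == "H": pass
  let st := if c = 'H' ∧ st.1 ≠ "H" then ("H", st.2 + 1) else st
  st

def kooka_counter (laughing : String) : Int :=
  (laughing.toList.foldl kookaStepA ("", 0)).2

-- ===== PORT B =====
def kooka_counter_alt (laughing : String) : Int :=
  let runs := laughing.toList.filter (fun c => c = 'h' ∨ c = 'H')  -- c in "hH"
  match runs with
  | [] => 0
  | _ :: tl => 1 + (((runs.zip tl).filter (fun p => p.1 ≠ p.2)).length : Int)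

-- ===== PRECONDITION & SPEC =====
def Spec_kooka_counter (laughing : String) (out : Int) : Prop := out = kooka_counter_alt laughing
instance (laughing : String) (out : Int) : Decidable (Spec_kooka_counter laughing out) := by unfold Spec_kooka_counter; infer_instance

-- ===== CLAIM (what is proved, stated in full; the proofs are below) =====
def Claim_equal_kooka_counter : Prop := ∀ (laughing : String), Dom_kooka_counter laughing → Spec_kooka_counter laughing (kooka_counter laughing)

-- ===== LEMMAS AND PROOFS =====

-- group counter over the filtered stream, parametrised by the previous char
def kookaG (prev : Option Char) : List Char → Int
  | [] => 0
  | c :: cs => (if some c = prev then 0 else 1) + kookaG (some c) cs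

def kookaToOpt (d : String) : Option Char :=
  if d = "h" then some 'h' else if d = "H" then some 'H' else none

lemma kookaStepA_h_same (n : Int) : kookaStepA ("h", n) 'h' = ("h", n) := by
  simp [kookaStepA]

lemma kookaStepA_h_diff (d : String) (n : Int) (hd : d ≠ "h") :
    kookaStepA (d, n) 'h' = ("h", n + 1) := by
  simp [kookaStepA, hd]

lemma kookaStepA_H_same (n : Int) : kookaStepA ("H", n) 'H' = ("H", n) := by
  simp [kookaStepA]

lemma kookaStepA_H_diff (d : String) (n : Int) (hd : d ≠ "H") :
    kookaStepA (d, n) 'H' = ("H", n + 1) := by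
  simp [kookaStepA, hd]

lemma kookaStepA_other (d : String) (n : Int) (c : Char) (hh : c ≠ 'h') (hH : c ≠ 'H') :
    kookaStepA (d, n) c = (d, n) := by
  simp [kookaStepA, hh, hH]

lemma kooka_fold_eq (l : List Char) : ∀ (d : String) (n : Int),
    (d = "" ∨ d = "h" ∨ d = "H") →
    (l.foldl kookaStepA (d, n)).2
      = n + kookaG (kookaToOpt d) (l.filter (fun c => c = 'h' ∨ c = 'H')) := by
  induction l with
  | nil => intro d n _; simp [kookaG]
  | cons c l ih =>
    intro d n hd
    by_cases hh : c = 'h'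
    · subst hh
      by_cases hdh : d = "h"
      · subst hdh
        rw [List.foldl_cons, kookaStepA_h_same, ih "h" n (by simp)]
        simp [kookaG, kookaToOpt]
      · rw [List.foldl_cons, kookaStepA_h_diff d n hdh, ih "h" (n + 1) (by simp)]
        have hne : some 'h' ≠ kookaToOpt d := by
          rcases hd with h | h | h <;> subst h <;> simp [kookaToOpt] at hdh ⊢
        have h2 : ('h' :: l).filter (fun c => decide (c = 'h' ∨ c = 'H'))
            = 'h' :: l.filter (fun c => decide (c = 'h' ∨ c = 'H')) := by simp
        rw [h2, kookaG, if_neg hne, (by simp [kookaToOpt] : kookaToOpt "h" = some 'h')]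
        ring
    · by_cases hH : c = 'H'
      · subst hH
        by_cases hdh : d = "H"
        · subst hdh
          rw [List.foldl_cons, kookaStepA_H_same, ih "H" n (by simp)]
          simp [kookaG, kookaToOpt]
        · rw [List.foldl_cons, kookaStepA_H_diff d n hdh, ih "H" (n + 1) (by simp)]
          have hne : some 'H' ≠ kookaToOpt d := by
            rcases hd with h | h | h <;> subst h <;> simp [kookaToOpt] at hdh ⊢
          have h2 : ('H' :: l).filter (fun c => decide (c = 'h' ∨ c = 'H'))
              = 'H' :: l.filter (fun c => decide (c = 'h' ∨ c = 'H')) := by simp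
          rw [h2, kookaG, if_neg hne, (by simp [kookaToOpt] : kookaToOpt "H" = some 'H')]
          ring
      · rw [List.foldl_cons, kookaStepA_other d n c hh hH, ih d n hd]
        simp [hh, hH]

lemma kookaG_zip (cs : List Char) : ∀ (x : Char),
    kookaG (some x) cs = (((x :: cs).zip cs).filter (fun p => p.1 ≠ p.2)).length := by
  induction cs with
  | nil => intro x; simp [kookaG]
  | cons c cs ih =>
    intro x
    simp only [kookaG, List.zip_cons_cons, List.filter_cons, ih c]
    by_cases h : x = c
    · subst h; simp
    · have : c ≠ x := fun hh => h hh.symm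
      simp [h, this]
      omega

lemma kooka_alt_eq_g (laughing : String) :
    kooka_counter_alt laughing
      = kookaG none (laughing.toList.filter (fun c => c = 'h' ∨ c = 'H')) := by
  unfold kooka_counter_alt
  cases hr : laughing.toList.filter (fun c => c = 'h' ∨ c = 'H') with
  | nil => simp [kookaG]
  | cons x tl =>
    simp only [kookaG, kookaG_zip tl x]
    simp

-- ===== VERDICT (by name: the statement is the Claim_ definition above) =====
theorem kooka_counter_spec : Claim_equal_kooka_counter := by
  intro laughing _
  unfold Spec_kooka_counter kooka_counter
  rw [kooka_fold_eq laughing.toList "" 0 (Or.inl rfl), kooka_alt_eq_g,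
    (show kookaToOpt "" = none from by unfold kookaToOpt; simp)]
  ring
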